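-- pv_equiv track=rewrite | github.com/drabiej/storywriter | generate_story.py | extract_chapter_hooks
-- ===== SOURCE A (Python) =====
-- from typing import List, Dict, Optional, Tuple
--
-- def extract_chapter_hooks(hooks_text: str, chapter_number: int) -> Dict[str, str]:
--     """Extract hooks relevant to the specific chapter."""
--     if not hooks_text:
--         return {}
--
--     hooks_by_chapter = {}
--     current_chapter = None
--     current_content = []
--
--     # Simple parsing to find chapter-specific hooks
--     for line in hooks_text.split('\n'):
--         if line.strip().startswith("### SECTION: Chapter"):
--             # Save previous chapter's hooks if we were collecting any
--             if current_chapter is not None and current_content: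
--                 hooks_by_chapter[current_chapter] = '\n'.join(current_content)
--                 current_content = []
--
--             # Extract chapter number - handle formats like "Chapter 3" or "Chapter 3 - Title"
--             try:
--                 chapter_text = line.split("Chapter")[1].split()[0].split("-")[0].strip()
--                 current_chapter = int(chapter_text)
--             except:
--                 current_chapter = None
--         elif current_chapter is not None:
--             current_content.append(line)
--
--     # Save the last chapter's hooks
--     if current_chapter is not None and current_content:
--         hooks_by_chapter[current_chapter] = '\n'.join(current_content)
--
--     # If no chapter-specific hooks found, return all hooks for context
--     if not hooks_by_chapter:
--         return {"all": hooks_text}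
--
--     # Return hooks for requested chapter and adjacent chapters
--     result = {}
--     for ch in range(chapter_number - 1, chapter_number + 2):
--         if ch in hooks_by_chapter:
--             result[ch] = hooks_by_chapter[ch]
--
--     # If nothing found for this chapter range, return all hooks
--     if not result:
--         return {"all": hooks_text}
--
--     return result
-- ===== SOURCE B (Python) =====
-- def _parse_chapter(line):
--     """Chapter number from a header line; None if it cannot be parsed."""
--     try:
--         return int(line.split("Chapter")[1].split()[0].split("-")[0].strip())
--     except Exception:
--         return None
--
--
-- def _is_header(line):
--     return line.strip().startswith("### SECTION: Chapter")
--
--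
-- def extract_chapter_hooks(hooks_text: str, chapter_number: int):
--     """Extract hooks relevant to the specific chapter (span-based parse)."""
--     if not hooks_text:
--         return {}
--
--     hooks_by_chapter = {}
--     rest = hooks_text.split('\n')
--     while rest:
--         line, rest = rest[0], rest[1:]
--         if _is_header(line):
--             # the content block is the span of lines up to the next header
--             n = 0
--             while n < len(rest) and not _is_header(rest[n]):
--                 n += 1
--             body, rest = rest[:n], rest[n:]
--             ch = _parse_chapter(line)
--             if ch is not None and body:
--                 hooks_by_chapter[ch] = '\n'.join(body)
--
--     if not hooks_by_chapter:
--         return {"all": hooks_text}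
--
--     result = {ch: hooks_by_chapter[ch]
--               for ch in range(chapter_number - 1, chapter_number + 2)
--               if ch in hooks_by_chapter}
--     return result or {"all": hooks_text}
-- ===== Notes on version B (the rewrite author's own statement) =====
-- stated objective: alternative
-- what changed: Replaces A's one-pass state machine (current_chapter/current_content accumulator with save-on-header and end-of-loop flush) by a span-based parse: each header consumes the block of lines up to the next header in one inner scan, storing it directly; the fallback and range lookup are unchanged.
import Mathlib
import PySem

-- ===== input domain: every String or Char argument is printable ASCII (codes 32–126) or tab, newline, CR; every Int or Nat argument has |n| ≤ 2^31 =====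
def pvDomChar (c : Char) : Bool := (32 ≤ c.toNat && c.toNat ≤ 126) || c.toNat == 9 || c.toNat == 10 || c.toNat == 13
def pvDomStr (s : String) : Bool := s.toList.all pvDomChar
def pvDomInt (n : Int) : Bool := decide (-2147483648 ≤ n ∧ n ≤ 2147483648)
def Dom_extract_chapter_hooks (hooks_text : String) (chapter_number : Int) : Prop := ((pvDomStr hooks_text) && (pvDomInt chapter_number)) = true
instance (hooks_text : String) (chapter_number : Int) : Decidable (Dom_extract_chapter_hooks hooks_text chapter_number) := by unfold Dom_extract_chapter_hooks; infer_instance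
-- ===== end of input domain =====

-- B re-parses the text span-by-span (each header consumes its block up to the next header)
-- instead of A's one-pass state machine; return values are identical, no side effects involved.

-- line.strip().startswith("### SECTION: Chapter")  (shared by both sources verbatim)
def pvIsHeader (line : String) : Bool :=
  PySem.Str.startswith (PySem.Str.strip line) "### SECTION: Chapter"

-- try: int(line.split("Chapter")[1].split()[0].split("-")[0].strip()) except: None
-- (each pyGet? none is exactly the IndexError the bare except catches; ofStr? none is the ValueError)
def pvParseChapter (line : String) : Option Int :=
  match PySem.List.pyGet? ((PySem.Str.split? line "Chapter").getD []) 1 with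
  | none => none
  | some rest =>
    match PySem.List.pyGet? (PySem.Str.split₀ rest) 0 with
    | none => none
    | some tok =>
      match PySem.List.pyGet? ((PySem.Str.split? tok "-").getD []) 0 with
      | none => none
      | some t => PySem.Int.ofStr? (PySem.Str.strip t)

-- ===== PORT A =====
-- loop body of A's 'for line in hooks_text.split('\n')' (state: hooks_by_chapter, current_chapter, current_content)
def pvStepA (st : PySem.Dict Int String × Option Int × List String) (line : String) :
    PySem.Dict Int String × Option Int × List String :=
  let (hooks, cur, content) := st
  if pvIsHeader line then
    let (hooks, content) :=
      match cur with
      | some c => if content ≠ [] then (hooks.insert c (PySem.Str.join "\n" content), ([] : List String)) else (hooks, content)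
      | none => (hooks, content)
    (hooks, pvParseChapter line, content)
  else
    match cur with
    | some _ => (hooks, cur, content ++ [line])
    | none => (hooks, cur, content)

-- the post-loop 'save the last chapter's hooks'
def pvFinishA (st : PySem.Dict Int String × Option Int × List String) : PySem.Dict Int String :=
  match st.2.1 with
  | some c => if st.2.2 ≠ [] then st.1.insert c (PySem.Str.join "\n" st.2.2) else st.1
  | none => st.1

def extract_chapter_hooks (hooks_text : String) (chapter_number : Int) : List (String × String) :=
  if hooks_text = "" then []
  else
    -- split('\n'): the separator is non-empty, so split? never returns none
    let lines := (PySem.Str.split? hooks_text "\n").getD []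
    let hooks_by_chapter := pvFinishA (lines.foldl pvStepA (PySem.Dict.empty, none, []))
    if hooks_by_chapter.items = [] then [("all", hooks_text)]
    else
      let result := (PySem.List.pyRange (chapter_number - 1) (chapter_number + 2) 1).foldl
        (fun r ch => if hooks_by_chapter.contains ch then r.insert (PySem.Int.toStr ch) (hooks_by_chapter.getD ch "") else r)
        PySem.Dict.empty
      if result.items = [] then [("all", hooks_text)] else result.items

-- ===== PORT B =====
-- B's while loop: pop the head line; a header consumes the span up to the next header as its body
-- (Source B's index scan rest[:n] / rest[n:] with n = number of leading non-header lines IS takeWhile/dropWhile)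
def pvCollectB (d : PySem.Dict Int String) (lines : List String) : PySem.Dict Int String :=
  match lines with
  | [] => d
  | line :: rest =>
    if pvIsHeader line then
      let body := rest.takeWhile (fun x => !pvIsHeader x)
      let d' := match pvParseChapter line with
        | some c => if body ≠ [] then d.insert c (PySem.Str.join "\n" body) else d
        | none => d
      pvCollectB d' (rest.dropWhile (fun x => !pvIsHeader x))
    else pvCollectB d rest
termination_by lines.length
decreasing_by
  · simp only [List.length_cons]
    exact Nat.lt_succ_of_le (List.length_dropWhile_le _ _)
  · simp

def extract_chapter_hooks_alt (hooks_text : String) (chapter_number : Int) : List (String × String) :=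
  if hooks_text = "" then []
  else
    let hooks_by_chapter := pvCollectB PySem.Dict.empty ((PySem.Str.split? hooks_text "\n").getD [])
    if hooks_by_chapter.items = [] then [("all", hooks_text)]
    else
      -- {ch: hooks[ch] for ch in range(...) if ch in hooks}  as the fold it denotes
      let result := (PySem.List.pyRange (chapter_number - 1) (chapter_number + 2) 1).foldl
        (fun r ch => if hooks_by_chapter.contains ch then r.insert (PySem.Int.toStr ch) (hooks_by_chapter.getD ch "") else r)
        PySem.Dict.empty
      if result.items = [] then [("all", hooks_text)] else result.items

-- ===== PRECONDITION & SPEC =====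
def Spec_extract_chapter_hooks (hooks_text : String) (chapter_number : Int) (out : List (String × String)) : Prop := out = extract_chapter_hooks_alt hooks_text chapter_number
instance (hooks_text : String) (chapter_number : Int) (out : List (String × String)) : Decidable (Spec_extract_chapter_hooks hooks_text chapter_number out) := by unfold Spec_extract_chapter_hooks; infer_instance

-- ===== CLAIM (what is proved, stated in full; the proofs are below) =====
def Claim_equal_extract_chapter_hooks : Prop := ∀ (hooks_text : String) (chapter_number : Int), Dom_extract_chapter_hooks hooks_text chapter_number → Spec_extract_chapter_hooks hooks_text chapter_number (extract_chapter_hooks hooks_text chapter_number)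

-- ===== LEMMAS AND PROOFS =====

-- B skips a non-header prefix one line at a time, exactly like dropping it at once
theorem pvCollectB_dropWhile (d : PySem.Dict Int String) (xs : List String) :
    pvCollectB d (xs.dropWhile (fun x => !pvIsHeader x)) = pvCollectB d xs := by
  induction xs with
  | nil => simp [List.dropWhile]
  | cons x t ih =>
    by_cases h : pvIsHeader x
    · simp [List.dropWhile, h]
    · rw [List.dropWhile_cons_of_pos (by simp [h])]
      rw [ih]
      conv_rhs => rw [pvCollectB]
      simp [h]

-- the key invariant: A's running state machine computes B's span-based dictionary.
-- First component: state (d, none, []); second: state (d, some c, content) where the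
-- pending content extends through the non-header prefix of the remaining lines.
theorem pvFold_eq_collect (lines : List String) :
    (∀ d, pvFinishA (lines.foldl pvStepA (d, none, [])) = pvCollectB d lines) ∧
    (∀ d c content,
      pvFinishA (lines.foldl pvStepA (d, some c, content)) =
        pvCollectB
          (if content ++ lines.takeWhile (fun x => !pvIsHeader x) ≠ []
           then d.insert c (PySem.Str.join "\n" (content ++ lines.takeWhile (fun x => !pvIsHeader x)))
           else d)
          (lines.dropWhile (fun x => !pvIsHeader x))) := by
  induction lines with
  | nil =>
    constructor
    · intro d; simp [pvFinishA, pvCollectB]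
    · intro d c content
      simp only [List.foldl_nil, List.takeWhile_nil, List.dropWhile_nil, List.append_nil]
      simp [pvFinishA, pvCollectB]
  | cons l rest ih =>
    obtain ⟨ihn, ihs⟩ := ih
    constructor
    · intro d
      by_cases h : pvIsHeader l
      · rw [List.foldl_cons]
        show pvFinishA (rest.foldl pvStepA (pvStepA (d, none, []) l)) = _
        rw [pvCollectB]
        simp only [h, if_pos]
        cases hp : pvParseChapter l with
        | none =>
          simp only [pvStepA, h, if_pos, hp]
          rw [ihn d, ← pvCollectB_dropWhile]
        | some c =>
          simp only [pvStepA, h, if_pos, hp]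
          have := ihs d c []
          simpa using this
      · rw [List.foldl_cons]
        show pvFinishA (rest.foldl pvStepA (pvStepA (d, none, []) l)) = _
        conv_rhs => rw [pvCollectB]
        simp only [h, if_neg, Bool.false_eq_true, not_false_iff]
        simp only [pvStepA, h]
        simp only [Bool.false_eq_true, if_neg, not_false_iff]
        exact ihn d
    · intro d c content
      by_cases h : pvIsHeader l
      · have ht : (l :: rest).takeWhile (fun x => !pvIsHeader x) = [] :=
          List.takeWhile_cons_of_neg (by simp [h])
        have hd : (l :: rest).dropWhile (fun x => !pvIsHeader x) = l :: rest :=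
          List.dropWhile_cons_of_neg (by simp [h])
        rw [ht, hd, List.append_nil]
        rw [List.foldl_cons]
        show pvFinishA (rest.foldl pvStepA (pvStepA (d, some c, content) l)) = _
        simp only [pvStepA, h, if_pos]
        by_cases hc : content ≠ []
        · rw [if_pos hc]
          conv_rhs => rw [if_pos hc]
          set d' := d.insert c (PySem.Str.join "\n" content) with hd'
          conv_rhs => rw [pvCollectB]
          simp only [h, if_pos]
          cases hp : pvParseChapter l with
          | none =>
            rw [ihn d', ← pvCollectB_dropWhile]
          | some c2 =>
            have := ihs d' c2 []
            simpa using this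
        · rw [not_ne_iff] at hc
          subst hc
          simp only [ne_eq, not_true_eq_false, ite_false]
          conv_rhs => rw [pvCollectB]
          simp only [h, if_pos]
          cases hp : pvParseChapter l with
          | none =>
            rw [ihn d, ← pvCollectB_dropWhile]
          | some c2 =>
            have := ihs d c2 []
            simpa using this
      · have ht : (l :: rest).takeWhile (fun x => !pvIsHeader x) =
            l :: rest.takeWhile (fun x => !pvIsHeader x) :=
          List.takeWhile_cons_of_pos (by simp [h])
        have hd : (l :: rest).dropWhile (fun x => !pvIsHeader x) =
            rest.dropWhile (fun x => !pvIsHeader x) :=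
          List.dropWhile_cons_of_pos (by simp [h])
        rw [ht, hd, List.foldl_cons]
        show pvFinishA (rest.foldl pvStepA (pvStepA (d, some c, content) l)) = _
        simp only [pvStepA, h]
        simp only [Bool.false_eq_true, if_neg, not_false_iff]
        have := ihs d c (content ++ [l])
        rw [this]
        simp

-- ===== VERDICT (by name: the statement is the Claim_ definition above) =====
theorem extract_chapter_hooks_spec : Claim_equal_extract_chapter_hooks := by
  intro hooks_text chapter_number _
  show extract_chapter_hooks hooks_text chapter_number = extract_chapter_hooks_alt hooks_text chapter_number
  unfold extract_chapter_hooks extract_chapter_hooks_alt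
  by_cases h : hooks_text = ""
  · simp [h]
  · simp only [h, if_neg, not_false_iff]
    rw [(pvFold_eq_collect ((PySem.Str.split? hooks_text "\n").getD [])).1 PySem.Dict.empty]
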